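/- GENERATED by c/gen_decode.py: decode facts of the image, one per distinct instruction byte string. -/
import UserX.DecodeImage

#decode_all Toy.Dec
  "4183e403"  -- and r12d,0x3
  "4883f907"  -- cmp rcx,0x7
  "48c70424b38ab541"  -- mov QWORD PTR [rsp],0x41b58ab3
  "4c89ef"  -- mov rdi,r13
  "83c301"  -- add ebx,0x1
  "c7830000c00000000000"  -- mov DWORD PTR [rbx+0xc00000],0x0
  "e876010000"  -- call 105220
  "eb91"  -- jmp 10504d
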